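-- pv_equiv track=rewrite | github.com/surrealgrain/webrefurb-landing | pipeline/run8_readiness.py | _select_smoke_candidates
-- ===== SOURCE A (Python) =====
-- from typing import Any
--
-- def _select_smoke_candidates(candidates: list[dict[str, Any]]) -> list[dict[str, Any]]:
--     selected: list[dict[str, Any]] = []
--     for predicate in (
--         lambda item: item.get("establishment_profile") == "ramen_ticket_machine",
--         lambda item: item.get("establishment_profile") in {"izakaya_drink_heavy", "izakaya_course_heavy"},
--         lambda item: True,
--     ):
--         for item in candidates:
--             if len(selected) >= 10:
--                 return selected
--             if item in selected or not predicate(item):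
--                 continue
--             selected.append(item)
--             if len(selected) >= 5 and any(x.get("establishment_profile") == "ramen_ticket_machine" for x in selected) and any(
--                 x.get("establishment_profile") in {"izakaya_drink_heavy", "izakaya_course_heavy"} for x in selected
--             ):
--                 return selected
--     return selected
-- ===== SOURCE B (Python) =====
-- from typing import Any
--
-- _IZAKAYA = ("izakaya_drink_heavy", "izakaya_course_heavy")
--
--
-- def _tier(item: dict[str, Any]) -> int:
--     p = item.get("establishment_profile")
--     if p == "ramen_ticket_machine":
--         return 0
--     if p in _IZAKAYA:
--         return 1
--     return 2
--
--
-- def _select_smoke_candidates(candidates: list[dict[str, Any]]) -> list[dict[str, Any]]: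
--     selected: list[dict[str, Any]] = []
--     has_ramen = has_izakaya = False
--     for item in sorted(candidates, key=_tier):
--         if len(selected) >= 10:
--             break
--         if item in selected:
--             continue
--         selected.append(item)
--         t = _tier(item)
--         has_ramen = has_ramen or t == 0
--         has_izakaya = has_izakaya or t == 1
--         if len(selected) >= 5 and has_ramen and has_izakaya:
--             break
--     return selected
-- ===== Notes on version B (the rewrite author's own statement) =====
-- stated objective: alternative
-- what changed: Replaced A's three nested predicate passes over candidates (each rescanning `selected` with any() after every append) by a stable sort on a precomputed 3-valued tier key followed by a single flat scan that maintains the has-ramen/has-izakaya booleans incrementally.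
import Mathlib
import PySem

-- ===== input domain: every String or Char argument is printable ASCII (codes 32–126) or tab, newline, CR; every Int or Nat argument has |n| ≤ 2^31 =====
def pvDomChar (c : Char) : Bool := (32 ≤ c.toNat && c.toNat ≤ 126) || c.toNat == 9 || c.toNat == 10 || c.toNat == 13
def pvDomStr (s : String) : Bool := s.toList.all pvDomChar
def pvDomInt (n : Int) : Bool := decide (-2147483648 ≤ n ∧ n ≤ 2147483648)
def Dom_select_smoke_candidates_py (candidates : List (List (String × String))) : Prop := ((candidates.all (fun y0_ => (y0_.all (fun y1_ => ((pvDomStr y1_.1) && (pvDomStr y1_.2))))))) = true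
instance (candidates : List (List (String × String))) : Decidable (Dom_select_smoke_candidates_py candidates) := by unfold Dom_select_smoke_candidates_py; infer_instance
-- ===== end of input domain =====

-- B replaces A's three predicate passes (each rescanning `selected` with any()) by one stable sort
-- on a precomputed 3-valued tier key followed by a single scan that maintains the ramen/izakaya
-- flags incrementally (objective: alternative; same cost class).

-- ===== shared dict primitives (Python dict semantics on association lists) =====
-- item.get(k): first-match lookup in insertion order
def dget : List (String × String) → String → Option String
  | [], _ => none
  | (k, v) :: t, q => if k = q then some v else dget t q

-- Python's `==` on dicts: same key set, same values (insertion order ignored)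
def pyDictEq (x y : List (String × String)) : Bool :=
  (x.all fun p => dget x p.1 == dget y p.1) && (y.all fun p => dget x p.1 == dget y p.1)

-- Python's `item in selected` (list membership by dict value equality)
def memD (x : List (String × String)) (sel : List (List (String × String))) : Bool :=
  sel.any fun s => pyDictEq x s

-- ===== PORT A =====
def isRamen (x : List (String × String)) : Bool :=
  dget x "establishment_profile" == some "ramen_ticket_machine"

def isIzakaya (x : List (String × String)) : Bool :=
  dget x "establishment_profile" == some "izakaya_drink_heavy"
    || dget x "establishment_profile" == some "izakaya_course_heavy"

-- A's inner `for item in candidates` loop; the Bool is true iff the Python executed `return`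
def innerA (pred : List (String × String) → Bool) :
    List (List (String × String)) → List (List (String × String)) →
    (List (List (String × String)) × Bool)
  | [], sel => (sel, false)
  | x :: rest, sel =>
    if 10 ≤ sel.length then (sel, true)
    else if memD x sel || !pred x then innerA pred rest sel
    else
      if 5 ≤ (sel ++ [x]).length && (sel ++ [x]).any isRamen && (sel ++ [x]).any isIzakaya then
        (sel ++ [x], true)
      else innerA pred rest (sel ++ [x])

def select_smoke_candidates_py (candidates : List (List (String × String))) : List (List (String × String)) :=
  let r1 := innerA isRamen candidates []
  if r1.2 then r1.1
  else
    let r2 := innerA isIzakaya candidates r1.1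
    if r2.2 then r2.1
    else (innerA (fun _ => true) candidates r2.1).1

-- ===== PORT B =====
def tierOf (x : List (String × String)) : Int :=
  if dget x "establishment_profile" == some "ramen_ticket_machine" then 0
  else if dget x "establishment_profile" == some "izakaya_drink_heavy"
      || dget x "establishment_profile" == some "izakaya_course_heavy" then 1
  else 2

-- the single scan with incremental flags
def loopB : List (List (String × String)) → List (List (String × String)) → Bool → Bool →
    List (List (String × String))
  | [], sel, _, _ => sel
  | x :: rest, sel, hr, hi =>
    if 10 ≤ sel.length then sel
    else if memD x sel then loopB rest sel hr hi
    else
      if 5 ≤ (sel ++ [x]).length && (hr || (tierOf x == 0)) && (hi || (tierOf x == 1)) then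
        sel ++ [x]
      else loopB rest (sel ++ [x]) (hr || (tierOf x == 0)) (hi || (tierOf x == 1))

def select_smoke_candidates_py_alt (candidates : List (List (String × String))) : List (List (String × String)) :=
  loopB (PySem.List.sorted candidates (fun item => tierOf item) false) [] false false

-- ===== PRECONDITION & SPEC =====
def Spec_select_smoke_candidates_py (candidates : List (List (String × String))) (out : List (List (String × String))) : Prop := out = select_smoke_candidates_py_alt candidates
instance (candidates : List (List (String × String))) (out : List (List (String × String))) : Decidable (Spec_select_smoke_candidates_py candidates out) := by unfold Spec_select_smoke_candidates_py; infer_instance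

-- ===== CLAIM (what is proved, stated in full; the proofs are below) =====
def Claim_equal_select_smoke_candidates_py : Prop := ∀ (candidates : List (List (String × String))), Dom_select_smoke_candidates_py candidates → Spec_select_smoke_candidates_py candidates (select_smoke_candidates_py candidates)

-- ===== LEMMAS AND PROOFS =====

theorem tier_cases (x : List (String × String)) : tierOf x = 0 ∨ tierOf x = 1 ∨ tierOf x = 2 := by
  unfold tierOf; split_ifs <;> simp

theorem tier0_iff (x : List (String × String)) : (tierOf x == 0) = isRamen x := by
  unfold tierOf isRamen; split_ifs with h1 h2 <;> simp [h1]

theorem tier1_iff (x : List (String × String)) : (tierOf x == 1) = isIzakaya x := by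
  unfold tierOf isIzakaya
  split_ifs with h1 h2
  · simp only [beq_iff_eq] at h1; simp [h1]
  · simp [h2]
  · simp only [beq_iff_eq, Bool.or_eq_true] at h2 ⊢; simp; tauto

theorem pyDictEq_refl (x : List (String × String)) : pyDictEq x x = true := by
  simp [pyDictEq, List.all_eq_true]

theorem memD_append_left {x : List (String × String)} {sel u : List (List (String × String))}
    (h : memD x sel = true) : memD x (sel ++ u) = true := by
  simp [memD, List.any_append]; simp [memD] at h; exact Or.inl h

theorem loopB_of_ge10 {sel : List (List (String × String))}
    (h : 10 ≤ sel.length) (l : List (List (String × String))) (hr hi : Bool) :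
    loopB l sel hr hi = sel := by
  cases l <;> simp [loopB, h]

theorem innerA_ext (pred : List (String × String) → Bool)
    (l : List (List (String × String))) :
    ∀ sel, ∃ u, (innerA pred l sel).1 = sel ++ u := by
  induction l with
  | nil => intro sel; exact ⟨[], by simp [innerA]⟩
  | cons x rest ih =>
    intro sel
    simp only [innerA]
    split_ifs with h1 h2 h3
    · exact ⟨[], by simp⟩
    · exact ih sel
    · exact ⟨[x], rfl⟩
    · obtain ⟨u, hu⟩ := ih (sel ++ [x])
      exact ⟨[x] ++ u, by simp [hu]⟩

theorem innerA_cov (pred : List (String × String) → Bool)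
    (l : List (List (String × String))) :
    ∀ sel, (innerA pred l sel).2 = false →
    ∀ x ∈ l, pred x = true → memD x (innerA pred l sel).1 = true := by
  induction l with
  | nil => intro sel _ x hx; simp at hx
  | cons y rest ih =>
    intro sel hb x hx hpx
    simp only [innerA] at hb ⊢
    by_cases h1 : 10 ≤ sel.length
    · rw [if_pos h1] at hb; simp at hb
    · rw [if_neg h1] at hb ⊢
      by_cases h2 : (memD y sel || !pred y) = true
      · rw [if_pos h2] at hb ⊢
        rcases List.mem_cons.1 hx with rfl | hx'
        · have hm : memD x sel = true := by
            rw [Bool.or_eq_true] at h2; rcases h2 with hm | hp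
            · exact hm
            · rw [hpx] at hp; simp at hp
          obtain ⟨u, hu⟩ := innerA_ext pred rest sel
          rw [hu]; exact memD_append_left hm
        · exact ih sel hb x hx' hpx
      · rw [if_neg h2] at hb ⊢
        by_cases h3 : (5 ≤ (sel ++ [y]).length && (sel ++ [y]).any isRamen && (sel ++ [y]).any isIzakaya) = true
        · rw [if_pos h3] at hb; simp at hb
        · rw [if_neg h3] at hb ⊢
          rcases List.mem_cons.1 hx with rfl | hx'
          · obtain ⟨u, hu⟩ := innerA_ext pred rest (sel ++ [x])
            rw [hu]
            exact memD_append_left (by simp [memD, List.any_append, pyDictEq_refl])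
          · exact ih (sel ++ [y]) hb x hx' hpx

-- a pass of A over `candidates` inside the flat loop: processing `l.filter pred` first
-- equals running A's pass, then (if it did not return) continuing with the rest
theorem pass_lemma (pred : List (String × String) → Bool)
    (l : List (List (String × String))) :
    ∀ (sel rest : List (List (String × String))) (hr hi : Bool),
    hr = sel.any isRamen → hi = sel.any isIzakaya →
    loopB (l.filter pred ++ rest) sel hr hi =
      (if (innerA pred l sel).2 then (innerA pred l sel).1
       else loopB rest (innerA pred l sel).1
              ((innerA pred l sel).1.any isRamen) ((innerA pred l sel).1.any isIzakaya)) := by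
  induction l with
  | nil =>
    intro sel rest hr hi hhr hhi
    simp only [innerA, List.filter_nil, List.nil_append, if_neg Bool.false_ne_true]
    rw [hhr, hhi]
  | cons y t ih =>
    intro sel rest hr hi hhr hhi
    simp only [innerA]
    by_cases h1 : 10 ≤ sel.length
    · rw [if_pos h1, loopB_of_ge10 h1]; simp
    · rw [if_neg h1]
      by_cases hp : pred y = true
      · have hfc : (y :: t).filter pred = y :: t.filter pred := by simp [hp]
        rw [hfc]
        by_cases h2 : memD y sel = true
        · have : (memD y sel || !pred y) = true := by simp [h2]
          rw [if_pos this]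
          simp only [List.cons_append, loopB, if_neg h1, if_pos h2]
          exact ih sel rest hr hi hhr hhi
        · have : (memD y sel || !pred y) = false := by simp [h2, hp]
          rw [this, if_neg Bool.false_ne_true]
          have hcond : (5 ≤ (sel ++ [y]).length && (hr || (tierOf y == 0)) && (hi || (tierOf y == 1)))
              = (5 ≤ (sel ++ [y]).length && (sel ++ [y]).any isRamen && (sel ++ [y]).any isIzakaya) := by
            rw [tier0_iff, tier1_iff, hhr, hhi]; simp [List.any_append]
          simp only [List.cons_append, loopB, if_neg h1, if_neg h2, hcond]
          by_cases h3 : (5 ≤ (sel ++ [y]).length && (sel ++ [y]).any isRamen && (sel ++ [y]).any isIzakaya) = true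
          · rw [if_pos h3, if_pos h3]; simp
          · rw [if_neg h3, if_neg h3]
            exact ih (sel ++ [y]) rest _ _ (by simp [List.any_append, tier0_iff, hhr]) (by simp [List.any_append, tier1_iff, hhi])
      · have hfc : (y :: t).filter pred = t.filter pred := by simp [hp]
        rw [Bool.not_eq_true] at hp
        have : (memD y sel || !pred y) = true := by simp [hp]
        rw [hfc, if_pos this]
        exact ih sel rest hr hi hhr hhi

-- the last pass: tier-0/1 items are already selected, so A's scan of all candidates
-- equals the flat scan of the tier-2 items
theorem skip3_lemma (l : List (List (String × String))) :
    ∀ (sel : List (List (String × String))) (hr hi : Bool),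
    hr = sel.any isRamen → hi = sel.any isIzakaya →
    (∀ x ∈ l, (tierOf x == 2) = false → memD x sel = true) →
    loopB (l.filter fun x => tierOf x == 2) sel hr hi = (innerA (fun _ => true) l sel).1 := by
  induction l with
  | nil => intro sel hr hi _ _ _; simp [innerA, loopB]
  | cons y t ih =>
    intro sel hr hi hhr hhi hcov
    simp only [innerA]
    by_cases h1 : 10 ≤ sel.length
    · rw [if_pos h1, loopB_of_ge10 h1]
    · rw [if_neg h1]
      have hskip : ((memD y sel || !(fun _ => true) y) = true) ↔ memD y sel = true := by simp
      by_cases h2t : (tierOf y == 2) = true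
      · have hfc : (y :: t).filter (fun x => tierOf x == 2) = y :: t.filter (fun x => tierOf x == 2) := by
          simp [h2t]
        rw [hfc]
        by_cases h2 : memD y sel = true
        · rw [if_pos (hskip.2 h2)]
          simp only [loopB, if_neg h1, if_pos h2]
          exact ih sel hr hi hhr hhi (fun x hx => hcov x (List.mem_cons_of_mem _ hx))
        · have : (memD y sel || !(fun _ => true) y) = false := by simp [h2]
          rw [this, if_neg Bool.false_ne_true]
          have hcond : (5 ≤ (sel ++ [y]).length && (hr || (tierOf y == 0)) && (hi || (tierOf y == 1)))
              = (5 ≤ (sel ++ [y]).length && (sel ++ [y]).any isRamen && (sel ++ [y]).any isIzakaya) := by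
            rw [tier0_iff, tier1_iff, hhr, hhi]; simp [List.any_append]
          simp only [loopB, if_neg h1, if_neg h2, hcond]
          by_cases h3 : (5 ≤ (sel ++ [y]).length && (sel ++ [y]).any isRamen && (sel ++ [y]).any isIzakaya) = true
          · rw [if_pos h3, if_pos h3]
          · rw [if_neg h3, if_neg h3]
            exact ih (sel ++ [y]) _ _ (by simp [List.any_append, tier0_iff, hhr])
              (by simp [List.any_append, tier1_iff, hhi])
              (fun x hx hxt => memD_append_left (hcov x (List.mem_cons_of_mem _ hx) hxt))
      · have hm : memD y sel = true := hcov y (List.mem_cons_self) (by simpa using h2t)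
        have hfc : (y :: t).filter (fun x => tierOf x == 2) = t.filter (fun x => tierOf x == 2) := by
          simp [h2t]
        rw [hfc, if_pos (hskip.2 hm)]
        exact ih sel hr hi hhr hhi (fun x hx => hcov x (List.mem_cons_of_mem _ hx))

theorem insertBy_between (before : List (String × String) → List (String × String) → Bool)
    (x : List (String × String)) (l : List (List (String × String))) :
    ∀ r : List (List (String × String)),
    (∀ y ∈ l, before x y = false) → (∀ y ∈ r, before x y = true) →
    PySem.List.insertBy before x (l ++ r) = l ++ x :: r := by
  induction l with
  | nil =>
    intro r _ hr
    cases r with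
    | nil => simp [PySem.List.insertBy]
    | cons z zs => simp [PySem.List.insertBy, hr z List.mem_cons_self]
  | cons z l' ih =>
    intro r hl hr
    simp only [List.cons_append, PySem.List.insertBy, hl z List.mem_cons_self,
      Bool.false_eq_true, if_false]
    rw [ih r (fun y hy => hl y (List.mem_cons_of_mem _ hy)) hr]

-- stability of the sort under the 3-valued tier key: each element lands at the end of its block
theorem fold3 (xs : List (List (String × String))) :
    ∀ a0 a1 a2 : List (List (String × String)),
    (∀ y ∈ a0, tierOf y = 0) → (∀ y ∈ a1, tierOf y = 1) → (∀ y ∈ a2, tierOf y = 2) →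
    xs.foldl (fun acc x => PySem.List.insertBy (fun a b => decide (tierOf a < tierOf b)) x acc)
        (a0 ++ a1 ++ a2)
      = (a0 ++ xs.filter fun x => tierOf x == 0) ++ (a1 ++ xs.filter fun x => tierOf x == 1)
          ++ (a2 ++ xs.filter fun x => tierOf x == 2) := by
  induction xs with
  | nil => intro a0 a1 a2 _ _ _; simp
  | cons x t ih =>
    intro a0 a1 a2 h0 h1 h2
    simp only [List.foldl_cons]
    rcases tier_cases x with ht | ht | ht
    · have step : PySem.List.insertBy (fun a b => decide (tierOf a < tierOf b)) x (a0 ++ a1 ++ a2)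
          = (a0 ++ [x]) ++ a1 ++ a2 := by
        rw [List.append_assoc]
        rw [insertBy_between _ x a0 (a1 ++ a2)
          (fun y hy => by simp [ht, h0 y hy])
          (fun y hy => by
            rcases List.mem_append.1 hy with hy1 | hy2
            · simp [ht, h1 y hy1]
            · simp [ht, h2 y hy2])]
        simp
      rw [step, ih (a0 ++ [x]) a1 a2
        (fun y hy => by rcases List.mem_append.1 hy with hy' | hy' <;> simp_all)
        h1 h2]
      simp [ht]
    · have step : PySem.List.insertBy (fun a b => decide (tierOf a < tierOf b)) x (a0 ++ a1 ++ a2)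
          = a0 ++ (a1 ++ [x]) ++ a2 := by
        rw [insertBy_between _ x (a0 ++ a1) a2
          (fun y hy => by
            rcases List.mem_append.1 hy with hy1 | hy2
            · simp [ht, h0 y hy1]
            · simp [ht, h1 y hy2])
          (fun y hy => by simp [ht, h2 y hy])]
        simp
      rw [step, ih a0 (a1 ++ [x]) a2 h0
        (fun y hy => by rcases List.mem_append.1 hy with hy' | hy' <;> simp_all)
        h2]
      simp [ht]
    · have step : PySem.List.insertBy (fun a b => decide (tierOf a < tierOf b)) x (a0 ++ a1 ++ a2)
          = a0 ++ a1 ++ (a2 ++ [x]) := by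
        rw [← List.append_assoc]
        rw [PySem.List.insertBy_of_forall_not_before _ x (a0 ++ a1 ++ a2)
          (fun y hy => by
            rcases List.mem_append.1 hy with hy' | hy2
            · rcases List.mem_append.1 hy' with hy0 | hy1
              · simp [ht, h0 y hy0]
              · simp [ht, h1 y hy1]
            · simp [ht, h2 y hy2])]
      rw [step, ih a0 a1 (a2 ++ [x]) h0 h1
        (fun y hy => by rcases List.mem_append.1 hy with hy' | hy' <;> simp_all)]
      simp [ht]

theorem sorted_tiers (c : List (List (String × String))) :
    PySem.List.sorted c (fun item => tierOf item) false =
      (c.filter fun x => tierOf x == 0) ++ (c.filter fun x => tierOf x == 1)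
        ++ (c.filter fun x => tierOf x == 2) := by
  rw [PySem.List.sorted_eq_foldl_insertBy]
  have := fold3 c [] [] [] (by simp) (by simp) (by simp)
  simpa using this

theorem main_eq (c : List (List (String × String))) :
    select_smoke_candidates_py c = select_smoke_candidates_py_alt c := by
  unfold select_smoke_candidates_py select_smoke_candidates_py_alt
  rw [sorted_tiers]
  have hf0 : (c.filter fun x => tierOf x == 0) = c.filter isRamen :=
    List.filter_congr (fun x _ => tier0_iff x)
  have hf1 : (c.filter fun x => tierOf x == 1) = c.filter isIzakaya :=
    List.filter_congr (fun x _ => tier1_iff x)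
  rw [hf0, hf1, List.append_assoc]
  rw [pass_lemma isRamen c [] _ false false (by simp) (by simp)]
  by_cases hb1 : (innerA isRamen c []).2 = true
  · simp [hb1]
  · rw [Bool.not_eq_true] at hb1
    simp only [hb1, Bool.false_eq_true, if_false]
    rw [pass_lemma isIzakaya c _ _ _ _ rfl rfl]
    by_cases hb2 : (innerA isIzakaya c (innerA isRamen c []).1).2 = true
    · simp [hb2]
    · rw [Bool.not_eq_true] at hb2
      simp only [hb2, Bool.false_eq_true, if_false]
      rw [skip3_lemma c _ _ _ rfl rfl]
      intro x hx hxt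
      rcases tier_cases x with ht | ht | ht
      · have hR : isRamen x = true := by rw [← tier0_iff, ht]; rfl
        have h1 := innerA_cov isRamen c [] hb1 x hx hR
        obtain ⟨u, hu⟩ := innerA_ext isIzakaya c (innerA isRamen c []).1
        rw [hu]
        exact memD_append_left h1
      · have hI : isIzakaya x = true := by rw [← tier1_iff, ht]; rfl
        exact innerA_cov isIzakaya c _ hb2 x hx hI
      · rw [ht] at hxt; simp at hxt

-- ===== VERDICT (by name: the statement is the Claim_ definition above) =====
theorem select_smoke_candidates_py_spec : Claim_equal_select_smoke_candidates_py := by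
  intro candidates _hdom
  unfold Spec_select_smoke_candidates_py
  exact main_eq candidates
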